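-- pv_equiv track=rewrite | github.com/voron521/Python_algorithms_and_data_structures | lesson_4/less_4_task_1.py | version_1
-- ===== SOURCE A (Python) =====
-- def version_1(matrix):
--     triger = 0
--
--     for i in range(0, len(matrix[0])):
--         min_ = matrix[0][i]
--         for j in range(0, len(matrix)):
--             if matrix[j][i] < min_:
--                 min_ = matrix[j][i]
--         if triger == 0:
--             min_2 = min_
--             triger = 1
--         if min_2 < min_:
--             min_2 = min_
--
--     return(f'максимальный элемент среди минимальных элементов столбцов: {min_2}')
-- ===== SOURCE B (Python) =====
-- def version_1(matrix):
--     col_min = matrix[0][:]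
--     for row in matrix[1:]:
--         col_min = [row[i] if row[i] < col_min[i] else col_min[i]
--                    for i in range(len(col_min))]
--     return (f'максимальный элемент среди минимальных элементов столбцов: '
--             f'{max(col_min)}')
-- ===== Notes on version B (the rewrite author's own statement) =====
-- stated objective: alternative
-- what changed: Replaces A's column-major nested index scan (recomputing each column minimum over all rows, with a trigger flag for the running max) by a single row-major pass that folds the remaining rows into a col_min table seeded from the first row, then takes max(col_min).
import Mathlib
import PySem

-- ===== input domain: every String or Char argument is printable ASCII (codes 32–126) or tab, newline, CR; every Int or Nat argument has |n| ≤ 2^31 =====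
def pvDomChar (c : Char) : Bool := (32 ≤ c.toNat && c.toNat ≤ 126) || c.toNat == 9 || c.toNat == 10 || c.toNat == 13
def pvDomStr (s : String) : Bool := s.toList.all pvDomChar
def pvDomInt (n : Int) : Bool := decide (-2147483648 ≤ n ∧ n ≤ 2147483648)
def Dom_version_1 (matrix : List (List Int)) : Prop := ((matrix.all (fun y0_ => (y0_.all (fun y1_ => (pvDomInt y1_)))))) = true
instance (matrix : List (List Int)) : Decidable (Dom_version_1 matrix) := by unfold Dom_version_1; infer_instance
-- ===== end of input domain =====

-- B replaces A's column-major nested index scan by one row-major pass building a col_min table, then max(col_min); same cost, different traversal.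

-- ===== PORT A =====
-- literal port of A: for each column index i, rescan all rows for the column minimum,
-- then update the running maximum min_2 guarded by the trigger flag.
def version_1 (matrix : List (List Int)) : String :=
  let st := (PySem.List.pyRange 0 ((PySem.List.pyGetD matrix 0 []).length : Int) 1).foldl
    (fun (st : Int × Int) i =>
      let mn := (PySem.List.pyRange 0 (matrix.length : Int) 1).foldl
        (fun m j =>
          if PySem.List.pyGetD (PySem.List.pyGetD matrix j []) i 0 < m
          then PySem.List.pyGetD (PySem.List.pyGetD matrix j []) i 0 else m)
        (PySem.List.pyGetD (PySem.List.pyGetD matrix 0 []) i 0)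
      let st1 := if st.1 = 0 then ((1 : Int), mn) else st
      if st1.2 < mn then (st1.1, mn) else st1)
    ((0 : Int), (0 : Int))
  "максимальный элемент среди минимальных элементов столбцов: " ++ PySem.Int.toStr st.2

-- ===== PORT B =====
-- the list comprehension of Source B's loop body: new col_min from row and the old col_min
def bStep (cm row : List Int) : List Int :=
  (PySem.List.pyRange 0 (cm.length : Int) 1).map (fun i =>
    if PySem.List.pyGetD row i 0 < PySem.List.pyGetD cm i 0
    then PySem.List.pyGetD row i 0 else PySem.List.pyGetD cm i 0)

-- literal port of Source B: fold the remaining rows into col_min (seeded from matrix[0]), then max.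
def version_1_alt (matrix : List (List Int)) : String :=
  let colmin := (matrix.drop 1).foldl bStep (PySem.List.pyGetD matrix 0 [])
  "максимальный элемент среди минимальных элементов столбцов: " ++
    PySem.Int.toStr ((PySem.List.max? colmin (fun y => y)).getD 0)

-- ===== PRECONDITION & SPEC =====
-- Pre_ excludes exactly the inputs on which A raises: an empty matrix (IndexError on matrix[0]),
-- an empty first row (UnboundLocalError on min_2), and a row shorter than the first row (IndexError).
def Pre_version_1 (matrix : List (List Int)) : Prop :=
  matrix ≠ [] ∧ matrix.headD [] ≠ [] ∧ ∀ row ∈ matrix, (matrix.headD []).length ≤ row.length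
instance (matrix : List (List Int)) : Decidable (Pre_version_1 matrix) := by
  unfold Pre_version_1; infer_instance
def pvWitness_version_1 : List (List Int) := [[3, 1], [2, 5]]

def Spec_version_1 (matrix : List (List Int)) (out : String) : Prop := out = version_1_alt matrix
instance (matrix : List (List Int)) (out : String) : Decidable (Spec_version_1 matrix out) := by
  unfold Spec_version_1; infer_instance

-- ===== CLAIM (what is proved, stated in full; the proofs are below) =====
def Claim_equal_version_1 : Prop := ∀ (matrix : List (List Int)), Dom_version_1 matrix → Pre_version_1 matrix → Spec_version_1 matrix (version_1 matrix)

-- ===== LEMMAS AND PROOFS =====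

-- the per-column minimum update, and its fold over a list of rows
def colStep (i : Int) (m : Int) (row : List Int) : Int :=
  if PySem.List.pyGetD row i 0 < m then PySem.List.pyGetD row i 0 else m

def colMin (rows : List (List Int)) (i : Int) (init : Int) : Int :=
  rows.foldl (fun m row => colStep i m row) init

-- A's outer-loop step, as a function of the column minimum mn
def aStepV (st : Int × Int) (mn : Int) : Int × Int :=
  let st1 := if st.1 = 0 then ((1 : Int), mn) else st
  if st1.2 < mn then (st1.1, mn) else st1

theorem bStep_length (cm row : List Int) : (bStep cm row).length = cm.length := by
  simp [bStep]

theorem bStep_get (cm row : List Int) (k : Nat) (hk : k < cm.length) :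
    PySem.List.pyGetD (bStep cm row) (k : Int) 0
      = colStep (k : Int) (PySem.List.pyGetD cm (k : Int) 0) row := by
  unfold bStep colStep
  rw [PySem.List.pyGetD_map_pyRange _ cm.length k 0 hk]

theorem bfold_length (rows : List (List Int)) (cm : List Int) :
    (rows.foldl bStep cm).length = cm.length := by
  induction rows generalizing cm with
  | nil => rfl
  | cons r rs ih => simp [List.foldl_cons, ih, bStep_length]

theorem bfold_get (rows : List (List Int)) (cm : List Int) (k : Nat) (hk : k < cm.length) :
    PySem.List.pyGetD (rows.foldl bStep cm) (k : Int) 0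
      = colMin rows (k : Int) (PySem.List.pyGetD cm (k : Int) 0) := by
  induction rows generalizing cm with
  | nil => rfl
  | cons r rs ih =>
      rw [List.foldl_cons, ih (bStep cm r) (by rw [bStep_length]; exact hk),
        bStep_get cm r k hk]
      rfl

theorem colMin_self_head (rest : List (List Int)) (r0 : List Int) (i : Int) :
    colMin (r0 :: rest) i (PySem.List.pyGetD r0 i 0)
      = colMin rest i (PySem.List.pyGetD r0 i 0) := by
  simp [colMin, colStep]

-- A's inner loop is colMin over all rows of the matrix
theorem aInner_eq (matrix : List (List Int)) (i : Int) (init : Int) :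
    (PySem.List.pyRange 0 (matrix.length : Int) 1).foldl
      (fun m j =>
        if PySem.List.pyGetD (PySem.List.pyGetD matrix j []) i 0 < m
        then PySem.List.pyGetD (PySem.List.pyGetD matrix j []) i 0 else m) init
      = colMin matrix i init := by
  have h := PySem.List.foldl_pyRange_zero_pyGetD' matrix ([] : List Int)
      (fun m row => colStep i m row) init
  simpa [colStep, colMin] using h

theorem if_lt_eq_max (m x : Int) : (if m < x then x else m) = max m x := by
  simp only [max_def]; split_ifs <;> omega

theorem aStepV_one (vt : List Int) (m : Int) :
    vt.foldl aStepV (1, m) = (1, vt.foldl max m) := by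
  induction vt generalizing m with
  | nil => rfl
  | cons x xs ih =>
      rw [List.foldl_cons, List.foldl_cons, ← ih (max m x)]
      congr 1
      simp only [aStepV, ← if_lt_eq_max]
      norm_num
      split_ifs <;> rfl

theorem aStepV_run (v : Int) (vt : List Int) :
    ((v :: vt).foldl aStepV ((0 : Int), (0 : Int))).2 = vt.foldl max v := by
  have h0 : aStepV (0, 0) v = (1, v) := by simp [aStepV]
  rw [List.foldl_cons, h0, aStepV_one]

-- ===== VERDICT (by name: the statement is the Claim_ definition above) =====
theorem version_1_spec : Claim_equal_version_1 := by
  intro matrix _hdom hpre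
  obtain ⟨hne, hrow0, hlen⟩ := hpre
  obtain ⟨r0, rest, rfl⟩ : ∃ r0 rest, matrix = r0 :: rest := by
    cases matrix with
    | nil => exact absurd rfl hne
    | cons a l => exact ⟨a, l, rfl⟩
  simp only [List.headD_cons] at hrow0 hlen
  unfold Spec_version_1 version_1 version_1_alt
  set w := r0.length with hw
  have hw0 : 0 < w := List.length_pos_iff.mpr hrow0
  -- the column-minimum of column i, shared by both sides
  set M : Int → Int := fun i => colMin rest i (PySem.List.pyGetD r0 i 0) with hM
  -- B's col_min table is the list of column minima
  have hget0 : PySem.List.pyGetD ((r0 :: rest) : List (List Int)) 0 [] = r0 := by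
    simp [PySem.List.pyGetD]
  have hcm : (((r0 :: rest) : List (List Int)).drop 1).foldl bStep
      (PySem.List.pyGetD ((r0 :: rest) : List (List Int)) 0 [])
      = (List.range w).map (fun k : Nat => M (k : Int)) := by
    rw [hget0]
    simp only [List.drop_one, List.tail_cons]
    apply List.ext_getElem
    · simp [bfold_length, hw]
    · intro k hk1 hk2
      have hkw : k < w := by simpa [bfold_length] using hk1
      have hg := bfold_get rest r0 k hkw
      have hpy : PySem.List.pyGetD (rest.foldl bStep r0) (k : Int) 0
          = (rest.foldl bStep r0).getD k 0 := by
        simp [PySem.List.pyGetD_natCast]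
      have hpy2 : PySem.List.pyGetD r0 (k : Int) 0 = r0.getD k 0 := by
        simp [PySem.List.pyGetD_natCast]
      have hlen' : k < (rest.foldl bStep r0).length := by simpa [bfold_length] using hkw
      simp only [List.getElem_map, List.getElem_range]
      rw [← List.getD_eq_getElem _ 0 hlen', ← hpy, hg, hM]
  -- A's outer loop, rewritten as a fold of aStepV over the same list of column minima
  have houter : (PySem.List.pyRange 0 ((PySem.List.pyGetD ((r0 :: rest) : List (List Int)) 0 []).length : Int) 1).foldl
      (fun (st : Int × Int) i =>
        let mn := (PySem.List.pyRange 0 (((r0 :: rest) : List (List Int)).length : Int) 1).foldl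
          (fun m j =>
            if PySem.List.pyGetD (PySem.List.pyGetD ((r0 :: rest) : List (List Int)) j []) i 0 < m
            then PySem.List.pyGetD (PySem.List.pyGetD ((r0 :: rest) : List (List Int)) j []) i 0 else m)
          (PySem.List.pyGetD (PySem.List.pyGetD ((r0 :: rest) : List (List Int)) 0 []) i 0)
        let st1 := if st.1 = 0 then ((1 : Int), mn) else st
        if st1.2 < mn then (st1.1, mn) else st1) ((0 : Int), (0 : Int))
      = ((List.range w).map (fun k : Nat => M (k : Int))).foldl aStepV ((0 : Int), (0 : Int)) := by
    rw [hget0, ← hw]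
    trans ((PySem.List.pyRange 0 (w : Int) 1).foldl (fun st i => aStepV st (M i)) ((0 : Int), (0 : Int)))
    · apply PySem.List.foldl_congr_mem
      intro st i _
      simp only
      rw [aInner_eq, colMin_self_head]
      rfl
    · rw [PySem.List.pyRange_zero_natCast, List.foldl_map, List.foldl_map]
  rw [houter, hcm]
  obtain ⟨v, vt, hvs⟩ := List.exists_cons_of_ne_nil
    (show (List.range w).map (fun k : Nat => M (k : Int)) ≠ [] by
      simp [List.map_eq_nil_iff, List.range_eq_nil]; omega)
  rw [hvs]
  simp only [aStepV_run, PySem.List.max?_id_cons, Option.getD_some]
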